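-- pv_equiv track=rewrite | github.com/oguzhankir/omnichunk | src/omnichunk/hierarchy/builder.py | _validate_levels
-- ===== SOURCE A (Python) =====
-- from collections.abc import Sequence
--
-- def _validate_levels(levels: Sequence[int]) -> tuple[int, ...]:
--     lv = tuple(int(x) for x in levels)
--     if len(lv) < 2:
--         raise ValueError("hierarchical_chunk requires at least 2 levels")
--     if any(x <= 0 for x in lv):
--         raise ValueError("all levels must be > 0")
--     if any(lv[i] > lv[i + 1] for i in range(len(lv) - 1)):
--         raise ValueError("levels must be sorted in ascending order")
--     return lv
-- ===== SOURCE B (Python) =====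
-- def _validate_levels(levels):
--     lv = tuple(int(x) for x in levels)
--     if len(lv) < 2:
--         raise ValueError("hierarchical_chunk requires at least 2 levels")
--     if min(lv) <= 0:
--         raise ValueError("all levels must be > 0")
--     if list(lv) != sorted(lv):
--         raise ValueError("levels must be sorted in ascending order")
--     return lv
-- ===== Notes on version B (the rewrite author's own statement) =====
-- stated objective: idiomatic
-- what changed: B replaces the element-wise positivity scan with a min() check and the pairwise adjacent-index generator scan with a sort-then-compare (list(lv) != sorted(lv)), keeping the same guard order and exceptions.
import Mathlib
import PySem

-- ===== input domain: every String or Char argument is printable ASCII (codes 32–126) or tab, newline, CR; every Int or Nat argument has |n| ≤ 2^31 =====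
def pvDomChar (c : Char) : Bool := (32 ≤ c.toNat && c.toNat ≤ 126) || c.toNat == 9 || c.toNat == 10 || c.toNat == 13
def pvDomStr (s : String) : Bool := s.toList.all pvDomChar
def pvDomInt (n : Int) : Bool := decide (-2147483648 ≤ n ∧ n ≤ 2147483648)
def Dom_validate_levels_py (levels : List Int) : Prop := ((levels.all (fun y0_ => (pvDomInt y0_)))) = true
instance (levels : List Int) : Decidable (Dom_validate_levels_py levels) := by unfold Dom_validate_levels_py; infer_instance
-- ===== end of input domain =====

-- B validates the same levels sequence via min() and sort-then-compare instead of element scans (idiomatic; same exceptions, same order).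

-- ===== PORT A =====
-- where the Python raises ValueError, Pre_ excludes the input; the port returns [] there
def validate_levels_py (levels : List Int) : List Int :=
  let lv := levels
  if lv.length < 2 then []
  else if lv.any (fun x => decide (x ≤ 0)) then []
  else if (PySem.List.pyRange 0 ((lv.length : Int) - 1) 1).any
      (fun i => decide (PySem.List.pyGetD lv i 0 > PySem.List.pyGetD lv (i + 1) 0)) then []
  else lv

-- ===== PORT B =====
def validate_levels_py_alt (levels : List Int) : List Int :=
  let lv := levels
  if lv.length < 2 then []
  else if (PySem.List.min? lv (fun x => x)).getD 0 ≤ 0 then []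
  else if lv ≠ PySem.List.sorted lv (fun x => x) false then []
  else lv

-- ===== PRECONDITION & SPEC =====
-- Pre_ = exactly the inputs where A returns (raises ValueError otherwise)
def Pre_validate_levels_py (levels : List Int) : Prop :=
  2 ≤ levels.length ∧ (∀ x ∈ levels, 0 < x) ∧ levels.Pairwise (· ≤ ·)
instance (levels : List Int) : Decidable (Pre_validate_levels_py levels) := by
  unfold Pre_validate_levels_py; infer_instance
def pvWitness_validate_levels_py : List Int := [1, 2, 2, 5]

def Spec_validate_levels_py (levels : List Int) (out : List Int) : Prop := out = validate_levels_py_alt levels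
instance (levels : List Int) (out : List Int) : Decidable (Spec_validate_levels_py levels out) := by unfold Spec_validate_levels_py; infer_instance

-- ===== CLAIM (what is proved, stated in full; the proofs are below) =====
def Claim_equal_validate_levels_py : Prop := ∀ (levels : List Int), Dom_validate_levels_py levels → Pre_validate_levels_py levels → Spec_validate_levels_py levels (validate_levels_py levels)

-- ===== LEMMAS AND PROOFS =====
theorem a_returns (levels : List Int) (h : Pre_validate_levels_py levels) :
    validate_levels_py levels = levels := by
  obtain ⟨hlen, hpos, hpw⟩ := h
  unfold validate_levels_py
  rw [if_neg (by omega)]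
  rw [if_neg (by simp; intro x hx; exact hpos x hx)]
  rw [if_neg ?_]
  simp only [List.any_eq_true, not_exists, not_and, decide_eq_true_eq]
  intro i hi
  rw [PySem.List.mem_pyRange_one] at hi
  obtain ⟨h0, h1⟩ := hi
  have hchain' := List.pairwise_iff_getElem.mp hpw
  have hiN : i.toNat + 1 < levels.length := by omega
  have e1 : PySem.List.pyGetD levels i 0 = levels[i.toNat] := by
    rw [PySem.List.pyGetD_of_nonneg (h := h0)]
    simp [List.getD, List.getElem?_eq_getElem (by omega : i.toNat < levels.length)]
  have e2 : PySem.List.pyGetD levels (i + 1) 0 = levels[i.toNat + 1] := by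
    rw [PySem.List.pyGetD_of_nonneg (h := by omega)]
    have : (i + 1).toNat = i.toNat + 1 := by omega
    simp [List.getD, this, List.getElem?_eq_getElem hiN]
  rw [e1, e2]
  simpa using hchain' i.toNat (i.toNat+1) (by omega) hiN (by omega)

theorem b_returns (levels : List Int) (h : Pre_validate_levels_py levels) :
    validate_levels_py_alt levels = levels := by
  obtain ⟨hlen, hpos, hpw⟩ := h
  unfold validate_levels_py_alt
  rw [if_neg (by omega)]
  rw [if_neg ?_, if_neg ?_]
  · rw [PySem.List.sorted_eq_self_of_pairwise _ _ hpw]; simp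
  · cases hm : PySem.List.min? levels (fun x => x) with
    | none =>
      have := (PySem.List.min?_eq_none_iff (xs := levels) (key := fun x => x)).mp hm
      subst this; simp at hlen
    | some m =>
      have := hpos m (PySem.List.min?_mem hm)
      simp; omega

-- ===== VERDICT (by name: the statement is the Claim_ definition above) =====
theorem validate_levels_py_spec : Claim_equal_validate_levels_py := by
  intro levels _ hpre
  unfold Spec_validate_levels_py
  rw [a_returns levels hpre, b_returns levels hpre]
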